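-- pv_equiv track=rewrite | github.com/chadhellkerley-code/chatbot1 | core/leads_filter_store.py | _normalize_item_indexes
-- ===== SOURCE A (Python) =====
-- from typing import Any, Callable, Iterable
--
-- def _normalize_item_indexes(item_indexes: Iterable[int] | None, total_items: int) -> list[int] | None:
--     if item_indexes is None:
--         return None
--     normalized: set[int] = set()
--     for raw_index in item_indexes:
--         try:
--             index = int(raw_index)
--         except Exception:
--             continue
--         if 0 <= index < total_items:
--             normalized.add(index)
--     return sorted(normalized)
-- ===== SOURCE B (Python) =====
-- def _merge(a, b):
--     out = []
--     i = j = 0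
--     while i < len(a) and j < len(b):
--         if a[i] < b[j]:
--             out.append(a[i]); i += 1
--         elif b[j] < a[i]:
--             out.append(b[j]); j += 1
--         else:
--             out.append(a[i]); i += 1; j += 1
--     out.extend(a[i:])
--     out.extend(b[j:])
--     return out
--
-- def _dedup_merge_sort(xs):
--     if len(xs) <= 1:
--         return list(xs)
--     mid = len(xs) // 2
--     return _merge(_dedup_merge_sort(xs[:mid]), _dedup_merge_sort(xs[mid:]))
--
-- def _normalize_item_indexes(item_indexes, total_items):
--     if item_indexes is None:
--         return None
--     valid = []
--     for raw_index in item_indexes: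
--         try:
--             index = int(raw_index)
--         except Exception:
--             continue
--         if 0 <= index < total_items:
--             valid.append(index)
--     return _dedup_merge_sort(valid)
-- ===== Notes on version B (the rewrite author's own statement) =====
-- stated objective: alternative
-- what changed: B replaces A's hash-set accumulation plus builtin sorted() with a hand-written top-down merge sort whose merge step eliminates duplicates on the fly (equal heads are merged into one element), so no set and no library sort are used.
import Mathlib
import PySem

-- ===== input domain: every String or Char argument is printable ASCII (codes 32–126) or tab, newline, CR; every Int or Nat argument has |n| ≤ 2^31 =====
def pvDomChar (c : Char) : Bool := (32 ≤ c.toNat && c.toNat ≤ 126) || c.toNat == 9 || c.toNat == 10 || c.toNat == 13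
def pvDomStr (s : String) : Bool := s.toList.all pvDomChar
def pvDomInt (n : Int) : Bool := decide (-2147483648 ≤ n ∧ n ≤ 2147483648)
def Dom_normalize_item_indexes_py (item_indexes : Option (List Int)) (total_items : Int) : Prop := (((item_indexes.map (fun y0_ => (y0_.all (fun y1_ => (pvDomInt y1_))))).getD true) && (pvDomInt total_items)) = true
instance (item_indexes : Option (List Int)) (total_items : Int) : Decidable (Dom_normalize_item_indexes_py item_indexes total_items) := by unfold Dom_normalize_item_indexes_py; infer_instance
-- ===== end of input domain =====

-- B replaces A's set-accumulation + builtin sorted with a hand-written merge sort that drops duplicates inside the merge (alternative algorithm, similar cost).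


-- ===== PORT A =====
-- int(raw_index) on an Int argument is the identity and never raises, so the try/except is the identity here.
def normalize_item_indexes_py (item_indexes : Option (List Int)) (total_items : Int) : Option (List Int) :=
  match item_indexes with
  | none => none
  | some xs =>
      let normalized : PySem.Set Int :=
        xs.foldl (fun s raw_index =>
          if 0 ≤ raw_index ∧ raw_index < total_items then PySem.Set.add s raw_index else s)
          PySem.Set.empty
      some (PySem.List.sorted normalized (fun x => x) false)

-- ===== PORT B =====
-- merge of Source B: the while loop over indexes i, j is ported as recursion over the two suffixes (exact step for step).
def pvMergeB : List Int → List Int → List Int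
  | [], b => b
  | a, [] => a
  | x :: a, y :: b =>
      if x < y then x :: pvMergeB a (y :: b)
      else if y < x then y :: pvMergeB (x :: a) b
      else x :: pvMergeB a b
termination_by a b => a.length + b.length

def pvMsortB (xs : List Int) : List Int :=
  if xs.length ≤ 1 then xs
  else pvMergeB (pvMsortB (xs.take (xs.length / 2))) (pvMsortB (xs.drop (xs.length / 2)))
termination_by xs.length
decreasing_by
  · simp only [List.length_take]; omega
  · simp only [List.length_drop]; omega

def normalize_item_indexes_py_alt (item_indexes : Option (List Int)) (total_items : Int) : Option (List Int) :=
  match item_indexes with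
  | none => none
  | some xs =>
      let valid : List Int := xs.filter (fun raw_index => decide (0 ≤ raw_index ∧ raw_index < total_items))
      some (pvMsortB valid)

-- ===== PRECONDITION & SPEC =====
def Spec_normalize_item_indexes_py (item_indexes : Option (List Int)) (total_items : Int) (out : Option (List Int)) : Prop := out = normalize_item_indexes_py_alt item_indexes total_items
instance (item_indexes : Option (List Int)) (total_items : Int) (out : Option (List Int)) : Decidable (Spec_normalize_item_indexes_py item_indexes total_items out) := by unfold Spec_normalize_item_indexes_py; infer_instance

-- ===== CLAIM (what is proved, stated in full; the proofs are below) =====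
def Claim_equal_normalize_item_indexes_py : Prop := ∀ (item_indexes : Option (List Int)) (total_items : Int), Dom_normalize_item_indexes_py item_indexes total_items → Spec_normalize_item_indexes_py item_indexes total_items (normalize_item_indexes_py item_indexes total_items)

-- ===== LEMMAS AND PROOFS =====

-- A's guarded fold equals folding Set.add over the filtered list.
theorem foldl_add_if_eq_filter (t : Int) : ∀ (xs : List Int) (s : PySem.Set Int),
    xs.foldl (fun s x => if 0 ≤ x ∧ x < t then PySem.Set.add s x else s) s
      = (xs.filter (fun x => decide (0 ≤ x ∧ x < t))).foldl PySem.Set.add s := by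
  intro xs
  induction xs with
  | nil => intro s; rfl
  | cons x xs ih =>
      intro s
      by_cases h : 0 ≤ x ∧ x < t <;> simp [h, ih]

-- merging two strictly increasing lists yields a strictly increasing list with the union of members
theorem mergeB_spec : ∀ (a b : List Int),
    a.Pairwise (· < ·) → b.Pairwise (· < ·) →
    (pvMergeB a b).Pairwise (· < ·) ∧ ∀ r, r ∈ pvMergeB a b ↔ r ∈ a ∨ r ∈ b := by
  intro a b
  induction a, b using pvMergeB.induct with
  | case1 b => intro _ hb; simpa [pvMergeB] using hb
  | case2 a h => intro ha _; cases a <;> simp_all [pvMergeB]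
  | case3 x a y b hxy ih =>
      intro ha hb
      have ha' := (List.pairwise_cons.mp ha)
      have := ih ha'.2 hb
      rw [pvMergeB, if_pos hxy]
      constructor
      · rw [List.pairwise_cons]
        refine ⟨?_, this.1⟩
        intro r hr
        rcases (this.2 r).mp hr with h | h
        · exact ha'.1 r h
        · have := (List.pairwise_cons.mp hb).1
          rcases List.mem_cons.mp h with rfl | h'
          · exact hxy
          · exact lt_trans hxy (this r h')
      · intro r; simp only [List.mem_cons, this.2 r]; tauto
  | case4 x a y b hxy hyx ih =>
      intro ha hb
      have hb' := (List.pairwise_cons.mp hb)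
      have := ih ha hb'.2
      rw [pvMergeB, if_neg hxy, if_pos hyx]
      constructor
      · rw [List.pairwise_cons]
        refine ⟨?_, this.1⟩
        intro r hr
        rcases (this.2 r).mp hr with h | h
        · have := (List.pairwise_cons.mp ha).1
          rcases List.mem_cons.mp h with rfl | h'
          · exact hyx
          · exact lt_trans hyx (this r h')
        · exact hb'.1 r h
      · intro r; simp only [List.mem_cons, this.2 r]; tauto
  | case5 x a y b hxy hyx ih =>
      intro ha hb
      have hxy' : x = y := le_antisymm (not_lt.mp hyx) (not_lt.mp hxy)
      subst hxy'
      have ha' := (List.pairwise_cons.mp ha)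
      have hb' := (List.pairwise_cons.mp hb)
      have := ih ha'.2 hb'.2
      rw [pvMergeB, if_neg hxy, if_neg hyx]
      constructor
      · rw [List.pairwise_cons]
        refine ⟨?_, this.1⟩
        intro r hr
        rcases (this.2 r).mp hr with h | h
        · exact ha'.1 r h
        · exact hb'.1 r h
      · intro r; simp only [List.mem_cons, this.2 r]; tauto

-- pvMsortB produces a strictly increasing list with the same member-set as its input
theorem msortB_spec : ∀ (xs : List Int),
    (pvMsortB xs).Pairwise (· < ·) ∧ ∀ r, r ∈ pvMsortB xs ↔ r ∈ xs := by
  intro xs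
  induction xs using pvMsortB.induct with
  | case1 xs h =>
      rw [pvMsortB, if_pos h]
      match xs, h with
      | [], _ => simp
      | [x], _ => simp
  | case2 xs h ih1 ih2 =>
      rw [pvMsortB, if_neg h]
      have hm := mergeB_spec _ _ ih1.1 ih2.1
      refine ⟨hm.1, ?_⟩
      intro r
      rw [hm.2 r, ih1.2 r, ih2.2 r, ← List.mem_append, List.take_append_drop]

theorem main_some (xs : List Int) (t : Int) :
    normalize_item_indexes_py (some xs) t = normalize_item_indexes_py_alt (some xs) t := by
  unfold normalize_item_indexes_py normalize_item_indexes_py_alt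
  simp only
  set L := xs.filter (fun x => decide (0 ≤ x ∧ x < t)) with hL
  have hfold : xs.foldl (fun s x => if 0 ≤ x ∧ x < t then PySem.Set.add s x else s)
      PySem.Set.empty = PySem.Set.ofList L := by
    rw [foldl_add_if_eq_filter, PySem.Set.ofList_eq_foldl]; rfl
  have hspec := msortB_spec L
  have hperm : (pvMsortB L).Perm (PySem.Set.ofList L) := by
    rw [List.perm_ext_iff_of_nodup (hspec.1.imp (fun h => ne_of_lt h)) (PySem.Set.nodup_ofList L)]
    intro a
    rw [hspec.2 a, PySem.Set.mem_ofList]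
  rw [hfold]
  congr 1
  exact PySem.List.sorted_eq_of_perm_of_pairwise_lt (PySem.Set.ofList L) (pvMsortB L) (fun x => x) hperm hspec.1

-- ===== VERDICT (by name: the statement is the Claim_ definition above) =====
theorem normalize_item_indexes_py_spec : Claim_equal_normalize_item_indexes_py := by
  intro item_indexes total_items _
  unfold Spec_normalize_item_indexes_py
  cases item_indexes with
  | none => rfl
  | some xs => exact main_some xs total_items
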